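-- pv_equiv track=rewrite | github.com/KurtBoehm/restitutor | src/restitutor/formatting.py | _render_table_row
-- ===== SOURCE A (Python) =====
-- def _render_table_row(cells: list[str], widths: list[int]) -> str:
--     """
--     Render a single logical row that may have multiline cells.
--
--     :param cells: Text per cell (possibly containing newlines).
--     :param widths: Column widths.
--     :return: One or more physical lines with trailing newlines.
--     """
--     # Split each cell into lines.
--     split_cells: list[list[str]] = []
--     for text in cells:
--         cell_lines = text.splitlines() if text else [""]
--         split_cells.append(cell_lines)
--
--     # Determine how many physical lines this row will have.
--     max_lines = max(len(c) for c in split_cells) if split_cells else 0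
--
--     out_lines: list[str] = []
--     for line_idx in range(max_lines):
--         parts = ["|"]
--         for col_idx, width in enumerate(widths):
--             cell_lines = split_cells[col_idx] if col_idx < len(split_cells) else [""]
--             line_text = cell_lines[line_idx] if line_idx < len(cell_lines) else ""
--             parts.append(" " + line_text.ljust(width) + " ")
--             parts.append("|")
--         out_lines.append("".join(parts) + "\n")
--     return "".join(out_lines)
-- ===== SOURCE B (Python) =====
-- def _render_table_row(cells: list[str], widths: list[int]) -> str:
--     # Column-major: keep one fragment buffer per physical line and extend every
--     # line by one padded column per pass, instead of emitting each line whole.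
--     split = [text.splitlines() if text else [""] for text in cells]
--     n = max(map(len, split), default=0)
--     bufs = [["|"] for _ in range(n)]
--     for col_idx, width in enumerate(widths):
--         col = split[col_idx] if col_idx < len(split) else []
--         col = col + [""] * (n - len(col))
--         for buf, s in zip(bufs, col):
--             buf.append(" " + s.ljust(width) + " |")
--     return "".join("".join(buf) + "\n" for buf in bufs)
-- ===== Notes on version B (the rewrite author's own statement) =====
-- stated objective: alternative
-- what changed: B interchanges the loops: instead of emitting each physical line whole by scanning all columns per line (row-major), it keeps one fragment buffer per physical line and appends one padded column fragment to every buffer per pass over the widths (column-major accumulation).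
import Mathlib
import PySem

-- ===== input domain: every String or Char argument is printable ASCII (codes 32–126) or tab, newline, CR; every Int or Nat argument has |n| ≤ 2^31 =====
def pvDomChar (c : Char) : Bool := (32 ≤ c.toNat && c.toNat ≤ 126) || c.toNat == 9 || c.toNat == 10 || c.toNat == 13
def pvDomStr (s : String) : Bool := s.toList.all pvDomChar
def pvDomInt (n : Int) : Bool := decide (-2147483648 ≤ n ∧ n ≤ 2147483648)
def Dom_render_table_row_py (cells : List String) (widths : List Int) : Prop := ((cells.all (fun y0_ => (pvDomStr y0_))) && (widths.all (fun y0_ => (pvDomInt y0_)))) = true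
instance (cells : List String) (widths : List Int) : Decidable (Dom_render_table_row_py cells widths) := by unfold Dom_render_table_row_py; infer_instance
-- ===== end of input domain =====

-- B interchanges the loops (column-major accumulation: one fragment buffer per
-- physical line, each pass over the widths appends one padded column fragment to
-- every buffer); objective: alternative decomposition, same cost as A.

-- shared helper: Python's str.ljust on code points (pad right with spaces to width w)
def pyLjust (cs : List Char) (w : Int) : List Char :=
  cs ++ List.replicate (w - (cs.length : Int)).toNat ' '

-- ===== PORT A =====
-- A, step for step: split every cell (the for-loop appending to split_cells),
-- max physical line count, then the nested line/column loops building out_lines.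
def render_table_row_py (cells : List String) (widths : List Int) : String :=
  let split_cells : List (List (List Char)) :=
    cells.foldl (fun acc text =>
      acc ++ [if text = "" then [[]] else PySem.Chars.splitlines text.toList]) []
  -- Python's max over the (nonempty) list of lengths is the running max; 0 ≤ every length
  let max_lines : Nat :=
    if split_cells = [] then 0 else (split_cells.map List.length).foldl max 0
  let out_lines : List (List Char) :=
    (List.range max_lines).foldl (fun out line_idx =>
      let parts : List (List Char) :=
        (PySem.List.enumerate widths).foldl (fun parts cw =>
          let cell_lines : List (List Char) :=
            if cw.1 < (split_cells.length : Int) then PySem.List.pyGetD split_cells cw.1 [[]]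
            else [[]]
          let line_text : List Char :=
            if line_idx < cell_lines.length then cell_lines.getD line_idx [] else []
          parts ++ [' ' :: pyLjust line_text cw.2 ++ [' '], ['|']]) [['|']]
      out ++ [parts.flatten ++ ['\n']]) []
  String.ofList out_lines.flatten

-- ===== PORT B =====
-- B, step for step: split the cells, n = max line count, one fragment buffer per
-- physical line, then one pass per column appending a fragment to every buffer
-- (the in-place buf.append is ported as appending to the buffer value).
def render_table_row_py_alt (cells : List String) (widths : List Int) : String :=
  let split : List (List (List Char)) :=
    cells.map (fun text => if text = "" then [[]] else PySem.Chars.splitlines text.toList)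
  let n : Nat := (split.map List.length).foldl max 0
  let bufs : List (List (List Char)) :=
    (PySem.List.enumerate widths).foldl (fun bufs cw =>
      let col : List (List Char) :=
        if cw.1 < (split.length : Int) then PySem.List.pyGetD split cw.1 [] else []
      let col := col ++ List.replicate (n - col.length) ([] : List Char)
      (bufs.zip col).map (fun p => p.1 ++ [' ' :: pyLjust p.2 cw.2 ++ [' ', '|']]))
      ((List.range n).map (fun _ => [['|']]))
  String.ofList ((bufs.map (fun buf => buf.flatten ++ ['\n'])).flatten)

-- ===== PRECONDITION & SPEC =====
def Spec_render_table_row_py (cells : List String) (widths : List Int) (out : String) : Prop := out = render_table_row_py_alt cells widths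
instance (cells : List String) (widths : List Int) (out : String) : Decidable (Spec_render_table_row_py cells widths out) := by unfold Spec_render_table_row_py; infer_instance

-- ===== CLAIM (what is proved, stated in full; the proofs are below) =====
def Claim_equal_render_table_row_py : Prop := ∀ (cells : List String) (widths : List Int), Dom_render_table_row_py cells widths → Spec_render_table_row_py cells widths (render_table_row_py cells widths)

-- ===== LEMMAS AND PROOFS =====

-- the common per-cell text at column k, physical line i (both defaults collapse to [])
def cellText (split : List (List (List Char))) (k : Int) (i : Nat) : List Char :=
  (if k < (split.length : Int) then PySem.List.pyGetD split k [] else []).getD i []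

-- the rendered piece " <padded> |" of column (k, w) at line i
def pieceCh (split : List (List (List Char))) (cw : Int × Int) (i : Nat) : List Char :=
  ' ' :: pyLjust (cellText split cw.1 i) cw.2 ++ [' ', '|']

-- B's padded column
def colPad (split : List (List (List Char))) (n : Nat) (k : Int) : List (List Char) :=
  (if k < (split.length : Int) then PySem.List.pyGetD split k [] else [])
    ++ List.replicate (n - (if k < (split.length : Int) then PySem.List.pyGetD split k [] else []).length) []

-- a foldl that only appends singletons is a map
theorem foldl_append_singleton {A B : Type} (f : A -> B) (l : List A) (acc : List B) :
    l.foldl (fun a t => a ++ [f t]) acc = acc ++ l.map f := by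
  induction l generalizing acc with
  | nil => simp
  | cons x xs ih => simp [List.foldl_cons, ih, List.map_cons]

-- a foldl that appends two elements per step is a flatMap
theorem foldl_append_two {A B : Type} (f g : A -> B) (l : List A) (acc : List B) :
    l.foldl (fun a t => a ++ [f t, g t]) acc = acc ++ l.flatMap (fun t => [f t, g t]) := by
  induction l generalizing acc with
  | nil => simp
  | cons x xs ih => simp [List.foldl_cons, ih]

-- the flatten of a two-element flatMap
theorem flatten_pairs {A B : Type} (f g : A -> List B) (l : List A) :
    (l.flatMap (fun t => [f t, g t])).flatten = l.flatMap (fun t => f t ++ g t) := by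
  induction l with
  | nil => rfl
  | cons x xs ih => simp [ih]

theorem flatMap_congr_mem {A B : Type} (l : List A) (f g : A -> List B)
    (h : forall x, x ∈ l -> f x = g x) : l.flatMap f = l.flatMap g := by
  induction l with
  | nil => rfl
  | cons x xs ih =>
    simp only [List.flatMap_cons]
    rw [h x (by simp), ih (fun y hy => h y (by simp [hy]))]

-- the empty-guard in A's max is redundant: the running max of [] is already 0
theorem max_lines_eq (sc : List (List (List Char))) :
    (if sc = [] then 0 else (sc.map List.length).foldl max 0)
      = (sc.map List.length).foldl max 0 := by
  cases sc <;> simp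

-- running max bounds
theorem le_foldl_max_acc (L : List Nat) (a : Nat) : a ≤ L.foldl max a := by
  induction L generalizing a with
  | nil => simp
  | cons h t ih => exact le_trans (le_max_left a h) (ih _)

theorem mem_le_foldl_max (L : List Nat) (a x : Nat) (hx : x ∈ L) : x ≤ L.foldl max a := by
  induction L generalizing a with
  | nil => cases hx
  | cons h t ih =>
    rcases List.mem_cons.mp hx with rfl | hm
    · exact le_trans (le_max_right a x) (le_foldl_max_acc t _)
    · exact ih _ hm

-- any column B extracts has at most maxLen lines
theorem col_len_le (split : List (List (List Char))) (k : Int) :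
    (if k < (split.length : Int) then PySem.List.pyGetD split k [] else []).length
      ≤ (split.map List.length).foldl max 0 := by
  split_ifs with h
  · cases hg : PySem.List.pyGet? split k with
    | none => simp [PySem.List.pyGetD, hg]
    | some x =>
      have hx : x ∈ split := by
        apply PySem.List.mem_of_pyGet?_eq_some
        exact hg
      have hm : x.length ∈ split.map List.length := List.mem_map_of_mem hx
      simpa [PySem.List.pyGetD, hg] using mem_le_foldl_max _ 0 _ hm
  · simp

theorem colPad_length (split : List (List (List Char))) (n : Nat) (k : Int)
    (h : (if k < (split.length : Int) then PySem.List.pyGetD split k [] else []).length ≤ n) :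
    (colPad split n k).length = n := by
  unfold colPad; simp; omega

-- the padded column reads back as cellText (padding entries are the default)
theorem colPad_getD (split : List (List (List Char))) (n : Nat) (k : Int) (i : Nat) :
    (colPad split n k).getD i [] = cellText split k i := by
  unfold colPad cellText
  set col := if k < (split.length : Int) then PySem.List.pyGetD split k [] else []
  rcases Nat.lt_or_ge i col.length with hi | hi
  · rw [List.getD_eq_getElem?_getD, List.getElem?_append_left hi,
      ← List.getD_eq_getElem?_getD]
  · rw [List.getD_eq_getElem?_getD, List.getD_eq_getElem?_getD,
      List.getElem?_eq_none hi, List.getElem?_append_right hi, List.getElem?_replicate]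
    split_ifs <;> rfl

-- a list of length n is the table of its getD over range n
theorem eq_map_range_getD {A : Type} (l : List A) (d : A) (n : Nat) (h : l.length = n) :
    (List.range n).map (fun i => l.getD i d) = l := by
  induction l generalizing n with
  | nil => subst h; rfl
  | cons x xs ih =>
    subst h
    rw [List.length_cons, List.range_succ_eq_map, List.map_cons, List.map_map]
    have h2 : (fun i => (x :: xs).getD i d) ∘ Nat.succ = fun i => xs.getD i d := by
      funext i; simp
    rw [h2, ih xs.length rfl]
    simp

-- loop interchange: B's fold over columns of a line vector equals, line by line,
-- the concatenation of that line's pieces over all columns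
theorem fold_cols (split : List (List (List Char))) (n : Nat)
    (hn : ∀ k : Int,
      (if k < (split.length : Int) then PySem.List.pyGetD split k [] else []).length ≤ n)
    (e : List (Int × Int)) (G : Nat → List (List Char)) :
    e.foldl (fun bufs cw =>
        ((bufs.zip
            ((if cw.1 < (split.length : Int) then PySem.List.pyGetD split cw.1 [] else [])
              ++ List.replicate
                  (n - (if cw.1 < (split.length : Int) then PySem.List.pyGetD split cw.1 [] else []).length)
                  ([] : List Char))).map
          (fun p => p.1 ++ [' ' :: pyLjust p.2 cw.2 ++ [' ', '|']])))
      ((List.range n).map G)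
    = (List.range n).map (fun i => G i ++ e.map (fun cw => pieceCh split cw i)) := by
  show e.foldl (fun bufs cw =>
        ((bufs.zip (colPad split n cw.1)).map
          (fun p => p.1 ++ [' ' :: pyLjust p.2 cw.2 ++ [' ', '|']])))
      ((List.range n).map G) = _
  induction e generalizing G with
  | nil => simp
  | cons cw rest ih =>
    rw [List.foldl_cons]
    have hcol : colPad split n cw.1
        = (List.range n).map (fun i => (colPad split n cw.1).getD i []) :=
      (eq_map_range_getD _ [] n (colPad_length split n cw.1 (hn cw.1))).symm
    rw [hcol, List.zip_map', List.map_map]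
    have hfun : ((fun p : List (List Char) × List Char => p.1 ++ [' ' :: pyLjust p.2 cw.2 ++ [' ', '|']]) ∘
        fun a => (G a, (colPad split n cw.1).getD a []))
        = fun i => G i ++ [pieceCh split cw i] := by
      funext i
      simp only [Function.comp]
      rw [colPad_getD]
      simp [pieceCh]
    rw [hfun, ih]
    refine List.map_congr_left fun i _ => ?_
    simp [List.append_assoc]

-- A's line text equals cellText (the [[ ]] default collapses)
theorem textA_eq (split : List (List (List Char))) (k : Int) (i : Nat) :
    (if i < (if k < (split.length : Int) then PySem.List.pyGetD split k [[]] else [[]]).length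
      then (if k < (split.length : Int) then PySem.List.pyGetD split k [[]] else [[]]).getD i []
      else [])
    = cellText split k i := by
  unfold cellText
  have step : ∀ (x : List (List Char)), (if i < x.length then x.getD i [] else []) = x.getD i [] := by
    intro x
    split_ifs with h
    · rfl
    · rw [List.getD_eq_getElem?_getD, List.getElem?_eq_none (by omega)]; rfl
  rw [step]
  split_ifs with h
  · cases hg : PySem.List.pyGet? split k with
    | none => cases i <;> simp [PySem.List.pyGetD, hg, List.getD]
    | some x => simp [PySem.List.pyGetD, hg]
  · cases i <;> simp [List.getD]

theorem render_table_row_py_spec : Claim_equal_render_table_row_py := by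
  intro cells widths _
  unfold Spec_render_table_row_py render_table_row_py render_table_row_py_alt
  simp only
  rw [foldl_append_singleton]
  rw [max_lines_eq]
  rw [foldl_append_singleton]
  simp only [List.nil_append]
  set split := cells.map (fun text => if text = "" then [[]] else PySem.Chars.splitlines text.toList) with hsplit
  set n := (split.map List.length).foldl max 0 with hn
  rw [fold_cols split n (fun k => col_len_le split k) (PySem.List.enumerate widths) (fun _ => [['|']])]
  congr 1
  rw [List.map_map]
  congr 1
  refine List.map_congr_left fun i _ => ?_
  simp only [Function.comp]
  rw [foldl_append_two]
  simp only [List.flatten_append, List.flatten_cons, List.flatten_nil,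
    flatten_pairs, List.append_nil]
  have hpieces : (PySem.List.enumerate widths).flatMap (fun cw =>
        (' ' :: pyLjust (if i < (if cw.1 < (split.length : Int) then PySem.List.pyGetD split cw.1 [[]] else [[]]).length
            then (if cw.1 < (split.length : Int) then PySem.List.pyGetD split cw.1 [[]] else [[]]).getD i []
            else []) cw.2 ++ [' ']) ++ ['|'])
      = (PySem.List.enumerate widths).flatMap (fun cw => pieceCh split cw i) := by
    apply flatMap_congr_mem
    intro cw _
    rw [textA_eq split cw.1 i]
    simp [pieceCh]
  rw [hpieces]
  simp [List.flatMap_def]
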